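-- pv_equiv track=rewrite | github.com/dpjr47/ProblemSolving | SOLUTIONS/SOLUTION#02/soln2.py | check_hands
-- ===== SOURCE A (Python) =====
-- def check_hands(LH,RH,word):
-- 	check = False
-- 	lh_count,rh_count = 0,0
-- 	for alpha in word:
-- 		if alpha in LH:
-- 			lh_count+=1
-- 		if alpha in RH:
-- 			rh_count+=1
--
-- 	if len(word) == lh_count:
-- 		return 'true'
-- 	elif len(word) == rh_count:
-- 		return 'true'
-- 	else:
-- 		return 'false'
-- ===== SOURCE B (Python) =====
-- def check_hands(LH, RH, word):
--     letters = set(word)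
--     return 'true' if letters.issubset(LH) or letters.issubset(RH) else 'false'
-- ===== Notes on version B (the rewrite author's own statement) =====
-- stated objective: simpler
-- what changed: Replaces the per-character counting loop with two counters and length comparisons by building the set of the word's letters once and testing a subset relation against each hand.
import Mathlib
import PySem

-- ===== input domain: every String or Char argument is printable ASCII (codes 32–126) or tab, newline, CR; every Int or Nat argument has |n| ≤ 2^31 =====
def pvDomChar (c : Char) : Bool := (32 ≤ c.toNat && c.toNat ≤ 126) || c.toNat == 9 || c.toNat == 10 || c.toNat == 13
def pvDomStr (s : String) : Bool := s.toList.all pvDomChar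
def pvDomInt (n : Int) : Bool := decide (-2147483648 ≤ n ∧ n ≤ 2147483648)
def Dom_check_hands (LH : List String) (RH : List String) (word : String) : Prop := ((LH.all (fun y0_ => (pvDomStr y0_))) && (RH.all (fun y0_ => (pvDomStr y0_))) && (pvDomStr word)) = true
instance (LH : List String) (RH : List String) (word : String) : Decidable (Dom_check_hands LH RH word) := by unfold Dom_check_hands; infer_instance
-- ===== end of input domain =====

-- ===== PORT A =====
-- counting loop over the word's characters, two counters compared with the length
def check_hands (LH : List String) (RH : List String) (word : String) : String :=
  let cnt := word.toList.foldl
    (fun (p : Int × Int) (alpha : Char) =>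
      let l := if (String.ofList [alpha]) ∈ LH then p.1 + 1 else p.1
      let r := if (String.ofList [alpha]) ∈ RH then p.2 + 1 else p.2
      (l, r)) (0, 0)
  if (word.toList.length : Int) = cnt.1 then "true"
  else if (word.toList.length : Int) = cnt.2 then "true"
  else "false"

-- ===== PORT B =====
-- set of the word's letters once, then a subset test against each hand
def check_hands_alt (LH : List String) (RH : List String) (word : String) : String :=
  let letters : PySem.Set String := PySem.Set.ofList (word.toList.map (fun c => String.ofList [c]))
  if PySem.Set.issubset letters LH || PySem.Set.issubset letters RH then "true" else "false"

-- ===== PRECONDITION & SPEC =====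
def Spec_check_hands (LH : List String) (RH : List String) (word : String) (out : String) : Prop := out = check_hands_alt LH RH word
instance (LH : List String) (RH : List String) (word : String) (out : String) : Decidable (Spec_check_hands LH RH word out) := by unfold Spec_check_hands; infer_instance

-- ===== CLAIM (what is proved, stated in full; the proofs are below) =====
def Claim_equal_check_hands : Prop := ∀ (LH : List String) (RH : List String) (word : String), Dom_check_hands LH RH word → Spec_check_hands LH RH word (check_hands LH RH word)

-- ===== LEMMAS AND PROOFS =====

lemma count_fold (H K : List String) (l : List Char) (a b : Int) :
    (l.foldl (fun (p : Int × Int) (alpha : Char) =>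
      let x := if (String.ofList [alpha]) ∈ H then p.1 + 1 else p.1
      let y := if (String.ofList [alpha]) ∈ K then p.2 + 1 else p.2
      (x, y)) (a, b)) =
    (a + (l.countP (fun c => decide ((String.ofList [c]) ∈ H)) : Int),
     b + (l.countP (fun c => decide ((String.ofList [c]) ∈ K)) : Int)) := by
  induction l generalizing a b with
  | nil => simp
  | cons c t ih =>
    simp only [List.foldl_cons, List.countP_cons, ih]
    by_cases h1 : (String.ofList [c]) ∈ H <;> by_cases h2 : (String.ofList [c]) ∈ K <;>
      simp [h1, h2, add_assoc, add_comm]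

lemma count_eq_len (l : List Char) (p : Char → Bool) :
    ((l.length : Int) = (l.countP p : Int)) ↔ ∀ c ∈ l, p c = true := by
  constructor
  · intro h c hc
    have hlen : l.countP p = l.length := by exact_mod_cast h.symm
    exact (List.countP_eq_length.mp hlen) c hc
  · intro h
    exact_mod_cast (List.countP_eq_length.mpr h).symm

lemma subset_iff (H : List String) (l : List Char) :
    PySem.Set.issubset (PySem.Set.ofList (l.map (fun c => String.ofList [c]))) H = true ↔
    ∀ c ∈ l, (String.ofList [c]) ∈ H := by
  rw [PySem.Set.issubset_iff]
  constructor
  · intro h c hc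
    exact h _ ((PySem.Set.mem_ofList _ _).mpr (List.mem_map.mpr ⟨c, hc, rfl⟩))
  · intro h x hx
    obtain ⟨c, hc, rfl⟩ := List.mem_map.mp ((PySem.Set.mem_ofList _ _).mp hx)
    exact h c hc

-- ===== VERDICT =====
theorem check_hands_spec : Claim_equal_check_hands := by
  intro LH RH word _
  unfold Spec_check_hands check_hands check_hands_alt
  simp only [count_fold, zero_add]
  have hsubL := subset_iff LH word.toList
  have hsubR := subset_iff RH word.toList
  by_cases hL : ∀ c ∈ word.toList, (String.ofList [c]) ∈ LH <;>
    by_cases hR : ∀ c ∈ word.toList, (String.ofList [c]) ∈ RH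
  · rw [if_pos ((count_eq_len word.toList _).mpr (fun c hc => decide_eq_true (hL c hc)))]
    simp [hsubL.mpr hL]
  · rw [if_pos ((count_eq_len word.toList _).mpr (fun c hc => decide_eq_true (hL c hc)))]
    simp [hsubL.mpr hL]
  · rw [if_neg (fun h => hL (fun c hc => of_decide_eq_true ((count_eq_len word.toList _).mp h c hc))),
        if_pos ((count_eq_len word.toList _).mpr (fun c hc => decide_eq_true (hR c hc)))]
    simp [hsubR.mpr hR]
  · rw [if_neg (fun h => hL (fun c hc => of_decide_eq_true ((count_eq_len word.toList _).mp h c hc))),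
        if_neg (fun h => hR (fun c hc => of_decide_eq_true ((count_eq_len word.toList _).mp h c hc)))]
    simp [hsubL, hsubR, hL, hR]
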